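-- pv_equiv track=rewrite | github.com/jcshott/interview_prep | hacker_rank/max_step.py | maxStep
-- ===== SOURCE A (Python) =====
-- def  maxStep(n, k):
--
--     curr_sum = 0
--     for x in range(1,k+1):
--         curr_sum += x
--         # if we go above k, then we will skip k in our jumping so we can take all steps.
--         if curr_sum > k:
--             return countSteps(n)
--         # if we'll hit k, then we need to skip taking a step on the first action
--         if curr_sum == k:
--             return countSteps(n)-1
--     return 0
--
-- def countSteps(num):
--     curr = 0
--     for x in range(1, num+1):
--         curr += x
--     return curr
-- ===== SOURCE B (Python) =====
-- def maxStep(n, k):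
--     # Closed-form total plus a binary search for the least m with T(m) >= k.
--     if k <= 0:
--         return 0
--     total = n * (n + 1) // 2 if n > 0 else 0
--     lo, hi = 1, k
--     while lo < hi:
--         mid = (lo + hi) // 2
--         if mid * (mid + 1) // 2 >= k:
--             hi = mid
--         else:
--             lo = mid + 1
--     return total - 1 if lo * (lo + 1) // 2 == k else total
-- ===== Notes on version B (the rewrite author's own statement) =====
-- stated objective: faster
-- what changed: Replaced A's linear scan of partial sums and its linear summation loop by a closed-form triangular total n*(n+1)//2 plus an O(log k) binary search for the least m with m*(m+1)/2 >= k (k is skipped iff that value equals k).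
import Mathlib
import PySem

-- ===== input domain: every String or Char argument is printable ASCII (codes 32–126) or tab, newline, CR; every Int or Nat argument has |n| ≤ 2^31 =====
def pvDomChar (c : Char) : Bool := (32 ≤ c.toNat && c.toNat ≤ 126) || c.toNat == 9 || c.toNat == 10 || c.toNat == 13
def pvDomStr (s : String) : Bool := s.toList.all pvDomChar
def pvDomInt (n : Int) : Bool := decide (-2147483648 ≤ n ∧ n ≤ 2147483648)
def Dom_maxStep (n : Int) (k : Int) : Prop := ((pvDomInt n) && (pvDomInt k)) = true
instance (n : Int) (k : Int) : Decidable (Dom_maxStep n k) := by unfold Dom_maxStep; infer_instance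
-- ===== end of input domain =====

-- B replaces A's two linear loops by a closed-form triangular sum and a binary
-- search for the least crossing index (objective: faster).

-- ===== PORT A =====
-- countSteps(num): sum of range(1, num+1)
def countSteps (num : Int) : Int :=
  (PySem.List.pyRange 1 (num + 1) 1).foldl (fun curr x => curr + x) 0

-- the for-loop 'for x in range(1, k+1)' with its two early returns, as recursion
-- on the loop counter x (range is lazy in Python; 0 when the range is exhausted)
def maxStepLoop (n : Int) (k : Int) (currSum : Int) (x : Int) : Int :=
  if _h : x ≤ k then
    let c := currSum + x
    if c > k then countSteps n
    else if c = k then countSteps n - 1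
    else maxStepLoop n k c (x + 1)
  else 0
termination_by (k + 1 - x).toNat
decreasing_by omega

def maxStep (n : Int) (k : Int) : Int :=
  maxStepLoop n k 0 1

-- ===== PORT B =====
-- the while-loop of B: binary search for the least m in [lo, hi] with m*(m+1)//2 >= k
def msSearch (k : Int) (lo : Int) (hi : Int) : Int :=
  if h : lo < hi then
    let mid := PySem.Int.floordiv (lo + hi) 2
    if PySem.Int.floordiv (mid * (mid + 1)) 2 ≥ k then msSearch k lo mid
    else msSearch k (mid + 1) hi
  else lo
termination_by (hi - lo).toNat
decreasing_by
  · have h2 : PySem.Int.floordiv (lo + hi) 2 < hi :=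
      (PySem.Int.floordiv_lt_iff_lt_mul (by norm_num)).mpr (by omega)
    omega
  · have h1 := PySem.Int.floordiv_two_mid_bounds (lo := lo) (hi := hi) (le_of_lt h)
    have h2 : PySem.Int.floordiv (lo + hi) 2 < hi :=
      (PySem.Int.floordiv_lt_iff_lt_mul (by norm_num)).mpr (by omega)
    omega

def maxStep_alt (n : Int) (k : Int) : Int :=
  if k ≤ 0 then 0
  else
    let total := if n > 0 then PySem.Int.floordiv (n * (n + 1)) 2 else 0
    let lo := msSearch k 1 k
    if PySem.Int.floordiv (lo * (lo + 1)) 2 = k then total - 1 else total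

-- ===== PRECONDITION & SPEC =====
def Spec_maxStep (n : Int) (k : Int) (out : Int) : Prop := out = maxStep_alt n k
instance (n : Int) (k : Int) (out : Int) : Decidable (Spec_maxStep n k out) := by unfold Spec_maxStep; infer_instance

-- ===== CLAIM (what is proved, stated in full; the proofs are below) =====
def Claim_equal_maxStep : Prop := ∀ (n : Int) (k : Int), Dom_maxStep n k → Spec_maxStep n k (maxStep n k)

-- ===== LEMMAS AND PROOFS =====

-- the triangular number m*(m+1)//2, as both programs compute it
def tri (m : Int) : Int := PySem.Int.floordiv (m * (m + 1)) 2

theorem tri_succ (m : Int) : tri (m + 1) = tri m + (m + 1) := by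
  obtain ⟨c, hc⟩ : Even (m * (m + 1)) := Int.even_mul_succ_self m
  have h2 : (m + 1) * (m + 1 + 1) = m * (m + 1) + 2 * (m + 1) := by ring
  rw [tri, tri, PySem.Int.floordiv_eq_ediv_of_pos (by norm_num),
      PySem.Int.floordiv_eq_ediv_of_pos (by norm_num)]
  omega

theorem tri_strict_mono {a b : Int} (ha : 0 ≤ a) (hab : a < b) : tri a < tri b := by
  obtain ⟨d, hd⟩ : ∃ d : Nat, b = a + 1 + d := ⟨(b - a - 1).toNat, by omega⟩
  subst hd
  induction d with
  | zero => have := tri_succ a; simp at *; omega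
  | succ d ih =>
      have h1 := tri_succ (a + 1 + d)
      have he : a + 1 + ((d + 1 : Nat) : Int) = (a + 1 + (d : Nat)) + 1 := by push_cast; ring
      rw [he, tri_succ]
      have := ih (by omega)
      omega

theorem tri_le_self {m : Int} (hm : 1 ≤ m) : m ≤ tri m := by
  obtain ⟨d, hd⟩ : ∃ d : Nat, m = 1 + d := ⟨(m - 1).toNat, by omega⟩
  subst hd
  induction d with
  | zero => decide
  | succ d ih =>
      have he : (1 : Int) + ((d + 1 : Nat) : Int) = (1 + (d : Nat)) + 1 := by push_cast; ring
      rw [he, tri_succ]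
      have := ih (by omega)
      omega

-- binary-search invariant: msSearch returns the least m ≥ lo with k ≤ tri m,
-- provided the crossing lies in [lo, hi]
theorem msSearch_spec (k : Int) : ∀ (j : Nat) (lo hi : Int), (hi - lo).toNat = j →
    0 ≤ lo → lo ≤ hi → k ≤ tri hi →
    (∀ m, lo ≤ m → m < msSearch k lo hi → tri m < k) ∧
    lo ≤ msSearch k lo hi ∧ msSearch k lo hi ≤ hi ∧ k ≤ tri (msSearch k lo hi) := by
  intro j
  induction j using Nat.strong_induction_on with
  | _ j ih =>
      intro lo hi hj h0 hle hcross
      by_cases h : lo < hi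
      · have hb := PySem.Int.floordiv_two_mid_bounds (lo := lo) (hi := hi) (le_of_lt h)
        have hlt : PySem.Int.floordiv (lo + hi) 2 < hi :=
          (PySem.Int.floordiv_lt_iff_lt_mul (by norm_num)).mpr (by omega)
        rw [msSearch, dif_pos h]
        by_cases hmid : PySem.Int.floordiv (PySem.Int.floordiv (lo + hi) 2 * (PySem.Int.floordiv (lo + hi) 2 + 1)) 2 ≥ k
        · rw [if_pos hmid]
          obtain ⟨hmin, hl, hh, hk'⟩ :=
            ih (PySem.Int.floordiv (lo + hi) 2 - lo).toNat (by omega) lo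
              (PySem.Int.floordiv (lo + hi) 2) rfl h0 (by omega) hmid
          exact ⟨hmin, hl, by omega, hk'⟩
        · rw [if_neg hmid]
          rw [not_le] at hmid
          obtain ⟨hmin, hl, hh, hk'⟩ :=
            ih (hi - (PySem.Int.floordiv (lo + hi) 2 + 1)).toNat (by omega)
              (PySem.Int.floordiv (lo + hi) 2 + 1) hi rfl (by omega) (by omega) hcross
          refine ⟨?_, by omega, hh, hk'⟩
          intro m hm hm'
          by_cases hcase : PySem.Int.floordiv (lo + hi) 2 + 1 ≤ m
          · exact hmin m hcase hm'
          · have hmm : m ≤ PySem.Int.floordiv (lo + hi) 2 := by omega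
            have hmono : tri m ≤ tri (PySem.Int.floordiv (lo + hi) 2) := by
              rcases lt_or_eq_of_le hmm with h' | h'
              · exact le_of_lt (tri_strict_mono (by omega) h')
              · rw [h']
            have htm : tri (PySem.Int.floordiv (lo + hi) 2) < k := hmid
            omega
      · have heq : lo = hi := by omega
        subst heq
        rw [msSearch, dif_neg h]
        exact ⟨fun m hm hm' => absurd (lt_of_le_of_lt hm hm') (lt_irrefl _),
               le_refl _, le_refl _, hcross⟩

-- countSteps equals the closed-form total of B
theorem countSteps_closed (n : Int) :
    countSteps n = if n > 0 then tri n else 0 := by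
  by_cases hn : n > 0
  · rw [if_pos hn]
    obtain ⟨d, hd⟩ : ∃ d : Nat, n = 1 + d := ⟨(n - 1).toNat, by omega⟩
    subst hd
    induction d with
    | zero => decide
    | succ d ih =>
        have he : (1 : Int) + ((d + 1 : Nat) : Int) = (1 + (d : Nat)) + 1 := by push_cast; ring
        rw [he, tri_succ, countSteps,
            PySem.List.pyRange_one_succ_right (a := 1) (b := 1 + (d : Nat) + 1) (by omega),
            List.foldl_append]
        have := ih (by omega)
        rw [countSteps] at this
        simp only [List.foldl_cons, List.foldl_nil]
        omega
  · rw [if_neg hn, countSteps, PySem.List.pyRange_one_eq_nil (by omega)]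
    rfl

-- A's loop, started at step x with running sum tri (x-1), returns according to
-- whether the least crossing r hits k exactly
theorem maxStepLoop_eq (n k r : Int) (hr1 : 1 ≤ r) (hrk : r ≤ k)
    (hcross : k ≤ tri r) (hmin : ∀ m, 1 ≤ m → m < r → tri m < k) :
    ∀ (j : Nat) (x : Int), 1 ≤ x → x ≤ r → (r - x).toNat = j →
      maxStepLoop n k (tri (x - 1)) x =
        (if tri r = k then countSteps n - 1 else countSteps n) := by
  intro j
  induction j with
  | zero =>
      intro x hx1 hxr hj
      have hxr' : x = r := by omega
      subst hxr'
      rw [maxStepLoop, dif_pos (show x ≤ k by omega)]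
      show (if tri (x - 1) + x > k then countSteps n
            else if tri (x - 1) + x = k then countSteps n - 1
            else maxStepLoop n k (tri (x - 1) + x) (x + 1)) = _
      have htx : tri (x - 1) + x = tri x := by
        have := tri_succ (x - 1); simp at this; omega
      rw [htx]
      by_cases hgt : tri x > k
      · rw [if_pos hgt, if_neg (by omega)]
      · rw [if_neg hgt, if_pos (by omega), if_pos (by omega)]
  | succ j ih =>
      intro x hx1 hxr hj
      rw [maxStepLoop, dif_pos (show x ≤ k by omega)]
      show (if tri (x - 1) + x > k then countSteps n
            else if tri (x - 1) + x = k then countSteps n - 1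
            else maxStepLoop n k (tri (x - 1) + x) (x + 1)) = _
      have htx : tri (x - 1) + x = tri x := by
        have := tri_succ (x - 1); simp at this; omega
      have hlt : tri x < k := hmin x hx1 (by omega)
      rw [htx, if_neg (by omega), if_neg (by omega)]
      have hx' : tri x = tri (x + 1 - 1) := by norm_num
      rw [hx']
      exact ih (x + 1) (by omega) (by omega) (by omega)

-- ===== VERDICT (by name: the statement is the Claim_ definition above) =====
theorem maxStep_spec : Claim_equal_maxStep := by
  unfold Claim_equal_maxStep
  intro n k _
  unfold Spec_maxStep
  by_cases hk : k ≤ 0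
  · -- range(1, k+1) is empty; A returns 0, B returns 0
    rw [maxStep, maxStepLoop, dif_neg (show ¬ (1 : Int) ≤ k by omega),
        maxStep_alt, if_pos hk]
  · rw [not_le] at hk
    have hcrossK : k ≤ tri k := tri_le_self (by omega)
    obtain ⟨hmin, h1r, hrk, hkr⟩ :=
      msSearch_spec k (k - 1).toNat 1 k (by omega) (by norm_num) (by omega) hcrossK
    have hA : maxStep n k =
        (if tri (msSearch k 1 k) = k then countSteps n - 1 else countSteps n) := by
      rw [maxStep]
      have h0 : (0 : Int) = tri (1 - 1) := by decide
      rw [h0]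
      exact maxStepLoop_eq n k (msSearch k 1 k) h1r hrk hkr hmin
        (msSearch k 1 k - 1).toNat 1 (le_refl 1) h1r (by omega)
    have hB : maxStep_alt n k =
        (if tri (msSearch k 1 k) = k then (if n > 0 then tri n else 0) - 1
         else (if n > 0 then tri n else 0)) := by
      show (if k ≤ 0 then 0
            else if tri (msSearch k 1 k) = k then (if n > 0 then tri n else 0) - 1
            else (if n > 0 then tri n else 0)) = _
      rw [if_neg (show ¬ k ≤ 0 by omega)]
    rw [hA, hB, countSteps_closed]
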